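-- pv_equiv track=rewrite | github.com/Neolemoz/THSL_SIGN2TEXT | ml/infer_seq2seq.py | _get_banned_tokens
-- ===== SOURCE A (Python) =====
-- from typing import Any, List
--
-- def _get_banned_tokens(generated: List[int], no_repeat_ngram: int) -> set[int]:
--     if no_repeat_ngram <= 0:
--         return set()
--     if len(generated) < no_repeat_ngram - 1:
--         return set()
--     if no_repeat_ngram == 1:
--         return set(generated)
--     prefix = tuple(generated[-(no_repeat_ngram - 1) :])
--     ngrams: dict[tuple[int, ...], set[int]] = {}
--     for i in range(len(generated) - no_repeat_ngram + 1):
--         prev = tuple(generated[i : i + no_repeat_ngram - 1])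
--         nxt = generated[i + no_repeat_ngram - 1]
--         ngrams.setdefault(prev, set()).add(nxt)
--     return ngrams.get(prefix, set())
-- ===== SOURCE B (Python) =====
-- from typing import List
--
-- def _get_banned_tokens(generated: List[int], no_repeat_ngram: int) -> set[int]:
--     if no_repeat_ngram <= 0:
--         return set()
--     if len(generated) < no_repeat_ngram - 1:
--         return set()
--     if no_repeat_ngram == 1:
--         return set(generated)
--     k = no_repeat_ngram - 1
--     prefix = generated[-k:]
--     banned: set[int] = set()
--     tail = generated
--     while len(tail) > k:
--         if tail[:k] == prefix:
--             banned.add(tail[k])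
--         tail = tail[1:]
--     return banned
-- ===== Notes on version B (the rewrite author's own statement) =====
-- stated objective: alternative
-- what changed: B drops A's dict of every (n-1)-gram with its follower set: it recurses over the suffixes of the sequence, comparing the head window of each suffix directly to the final (n-1)-gram and collecting only that prefix's followers (no dict, no storage of non-matching grams).
import Mathlib
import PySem

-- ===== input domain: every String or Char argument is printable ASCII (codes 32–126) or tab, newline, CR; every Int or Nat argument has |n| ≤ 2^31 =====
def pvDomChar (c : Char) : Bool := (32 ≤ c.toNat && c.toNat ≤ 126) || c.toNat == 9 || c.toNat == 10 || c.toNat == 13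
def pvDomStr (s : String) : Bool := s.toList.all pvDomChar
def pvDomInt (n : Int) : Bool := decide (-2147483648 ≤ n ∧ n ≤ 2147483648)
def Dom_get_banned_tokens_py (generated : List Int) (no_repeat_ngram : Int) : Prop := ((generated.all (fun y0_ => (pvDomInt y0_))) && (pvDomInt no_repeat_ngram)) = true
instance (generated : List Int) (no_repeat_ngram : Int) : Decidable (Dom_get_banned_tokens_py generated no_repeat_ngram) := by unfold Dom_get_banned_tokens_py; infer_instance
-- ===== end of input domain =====

-- B replaces A's dict of every (n-1)-gram with a recursion over the suffixes of the
-- sequence that keeps only followers of windows equal to the final (n-1)-gram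
-- (alternative decomposition, same result).

-- ===== PORT A =====
-- literal port of A: build a dict mapping every (n-1)-gram to the set of its followers, then look up the last (n-1)-gram
def get_banned_tokens_py (generated : List Int) (no_repeat_ngram : Int) : List Int :=
  if no_repeat_ngram ≤ 0 then PySem.Set.empty
  else if (generated.length : Int) < no_repeat_ngram - 1 then PySem.Set.empty
  else if no_repeat_ngram = 1 then PySem.Set.ofList generated
  else
    let pfx := PySem.List.slice generated (some (-(no_repeat_ngram - 1))) none
    let ngrams : PySem.Dict (List Int) (PySem.Set Int) :=
      (PySem.List.pyRange 0 ((generated.length : Int) - no_repeat_ngram + 1) 1).foldl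
        (fun d i =>
          let prev := PySem.List.slice generated (some i) (some (i + no_repeat_ngram - 1))
          let nxt := PySem.List.pyGetD generated (i + no_repeat_ngram - 1) 0
          d.modify prev PySem.Set.empty (fun s => PySem.Set.add s nxt))   -- setdefault(prev, set()).add(nxt)
        PySem.Dict.empty
    ngrams.getD pfx PySem.Set.empty

-- ===== PORT B =====
-- B's while-loop over the shrinking tail, as structural recursion on the list:
-- 'len(tail) > k' is 'k ≤ rest.length'; tail[:k] is take k; tail[k] is getD k 0,
-- exact here because the guard k ≤ rest.length keeps index k in range.
def pvCollect (pfx : List Int) (k : Nat) : List Int → List Int → List Int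
  | [], banned => banned
  | x :: rest, banned =>
      if k ≤ rest.length then
        pvCollect pfx k rest
          (if (x :: rest).take k = pfx then PySem.Set.add banned ((x :: rest).getD k 0) else banned)
      else banned

def get_banned_tokens_py_alt (generated : List Int) (no_repeat_ngram : Int) : List Int :=
  if no_repeat_ngram ≤ 0 then PySem.Set.empty
  else if (generated.length : Int) < no_repeat_ngram - 1 then PySem.Set.empty
  else if no_repeat_ngram = 1 then PySem.Set.ofList generated
  else
    -- in this branch no_repeat_ngram ≥ 2, so k = no_repeat_ngram - 1 is the exact Nat value of the Python int k
    let k := (no_repeat_ngram - 1).toNat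
    let pfx := PySem.List.slice generated (some (-(no_repeat_ngram - 1))) none
    pvCollect pfx k generated PySem.Set.empty

-- ===== PRECONDITION & SPEC =====
def Spec_get_banned_tokens_py (generated : List Int) (no_repeat_ngram : Int) (out : List Int) : Prop := out = get_banned_tokens_py_alt generated no_repeat_ngram
instance (generated : List Int) (no_repeat_ngram : Int) (out : List Int) : Decidable (Spec_get_banned_tokens_py generated no_repeat_ngram out) := by unfold Spec_get_banned_tokens_py; infer_instance

-- ===== CLAIM (what is proved, stated in full; the proofs are below) =====
def Claim_equal_get_banned_tokens_py : Prop := ∀ (generated : List Int) (no_repeat_ngram : Int), Dom_get_banned_tokens_py generated no_repeat_ngram → Spec_get_banned_tokens_py generated no_repeat_ngram (get_banned_tokens_py generated no_repeat_ngram)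

-- ===== LEMMAS AND PROOFS =====

-- looking up one key after a modify-loop = folding only the matching updates over that key's value
theorem getD_foldl_modify_set (L : List Int) (prev : Int → List Int) (nxt : Int → Int)
    (pfx : List Int) (d : PySem.Dict (List Int) (PySem.Set Int)) :
    (L.foldl (fun d i => d.modify (prev i) PySem.Set.empty (fun s => PySem.Set.add s (nxt i))) d).getD pfx PySem.Set.empty
      = L.foldl (fun s i => if prev i = pfx then PySem.Set.add s (nxt i) else s)
          (d.getD pfx PySem.Set.empty) := by
  induction L generalizing d with
  | nil => rfl
  | cons i L ih =>
      simp only [List.foldl_cons, ih]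
      congr 1
      rw [PySem.Dict.getD_modify]
      by_cases h : prev i = pfx
      · simp [h]
      · simp [h, Ne.symm h]

-- the index loop over windows, restated over Nat indices, is pvCollect's suffix recursion
theorem foldl_range_eq_pvCollect (pfx : List Int) (K : Nat) :
    ∀ (g : List Int) (s0 : List Int),
      (List.range (g.length - K)).foldl
        (fun s k => if (g.drop k).take K = pfx then PySem.Set.add s (g.getD (k + K) 0) else s) s0
      = pvCollect pfx K g s0 := by
  intro g
  induction g with
  | nil => intro s0; simp [pvCollect]
  | cons x rest ih =>
      intro s0
      by_cases h : K ≤ rest.length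
      · have hlen : (x :: rest).length - K = (rest.length - K) + 1 := by
          simp [List.length_cons]; omega
        rw [hlen, List.range_succ_eq_map, List.foldl_cons, List.foldl_map]
        simp only [List.drop_zero, Nat.zero_add]
        rw [pvCollect]
        simp only [h, if_true]
        rw [← ih]
        apply PySem.List.foldl_congr_mem
        intro s k _
        simp [Nat.succ_add, List.getD]
      · have hlen : (x :: rest).length - K = 0 := by
          simp [List.length_cons]; omega
        rw [hlen]
        simp [pvCollect, h]

-- the same loop with Python Int indices (slices and pyGetD) equals pvCollect
theorem fold_eq_pvCollect (pfx : List Int) (K : Nat) (g : List Int) (s0 : List Int) :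
    (PySem.List.pyRange 0 ((g.length : Int) - (K : Int)) 1).foldl
      (fun s i => if PySem.List.slice g (some i) (some (i + (K : Int))) = pfx
                  then PySem.Set.add s (PySem.List.pyGetD g (i + (K : Int)) 0) else s) s0
    = pvCollect pfx K g s0 := by
  rw [PySem.List.pyRange_one]
  have hb : (((g.length : Int) - (K : Int)) - 0).toNat = g.length - K := by omega
  rw [hb, List.foldl_map]
  rw [← foldl_range_eq_pvCollect]
  apply PySem.List.foldl_congr_mem
  intro s k _
  simp only [zero_add]
  rw [PySem.List.slice_natCast_add,
      show ((k : Nat) : Int) + ((K : Nat) : Int) = ((k + K : Nat) : Int) by push_cast; ring,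
      PySem.List.pyGetD_natCast]

-- ===== VERDICT (by name: the statement is the Claim_ definition above) =====
theorem get_banned_tokens_py_spec : Claim_equal_get_banned_tokens_py := by
  intro generated n _
  show get_banned_tokens_py generated n = get_banned_tokens_py_alt generated n
  unfold get_banned_tokens_py get_banned_tokens_py_alt
  split_ifs with h1 h2 h3
  · rfl
  · rfl
  · rfl
  · simp only []
    rw [getD_foldl_modify_set, PySem.Dict.getD_empty]
    have hK : (((n - 1).toNat : Nat) : Int) = n - 1 := Int.toNat_of_nonneg (by omega)
    rw [show (generated.length : Int) - n + 1 = (generated.length : Int) - (((n - 1).toNat : Nat) : Int) by omega]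
    simp only [show ∀ (i : Int), i + n - 1 = i + (((n - 1).toNat : Nat) : Int) from fun i => by omega]
    rw [fold_eq_pvCollect]
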